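-- pv_equiv track=rewrite | github.com/dharshan736/Altruisty-skillhunt | problem 4.py | min_adjacent_swaps
-- ===== SOURCE A (Python) =====
-- from collections import Counter
--
-- def min_adjacent_swaps(n, A, B):
--
--     if Counter(A) != Counter(B):
--         return -1
--
--     index_map = {char: [] for char in B}
--     for i, char in enumerate(B):
--         index_map[char].append(i)
--
--
--     target_positions = []
--     for char in A:
--         target_positions.append(index_map[char].pop(0))
--
--
--     def count_inversions(arr):
--         """ Use Fenwick Tree (BIT) to count inversions in O(N log N) """
--         max_val = max(arr) + 1
--         BIT = [0] * (max_val + 1)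
--
--         def update(x, delta):
--             while x <= max_val:
--                 BIT[x] += delta
--                 x += x & -x
--
--         def query(x):
--             sum_val = 0
--             while x > 0:
--                 sum_val += BIT[x]
--                 x -= x & -x
--             return sum_val
--
--         inv_count = 0
--         for i in reversed(arr):
--             inv_count += query(i)
--             update(i + 1, 1)
--
--         return inv_count
--
--     return count_inversions(target_positions)
-- ===== SOURCE B (Python) =====
-- from collections import Counter
--
-- def min_adjacent_swaps(n, A, B):
--     if Counter(A) != Counter(B):
--         return -1
--
--     index_map = {char: [] for char in B}
--     for i, char in enumerate(B):
--         index_map[char].append(i)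
--
--     # read each char's next position through a cursor dict instead of
--     # destructively popping list heads
--     taken = {}
--     t = []
--     for char in A:
--         k = taken.get(char, 0)
--         t.append(index_map[char][k])
--         taken[char] = k + 1
--
--     # count inversions by a direct pairwise scan instead of a Fenwick tree
--     total = 0
--     for j in range(len(t)):
--         for i in range(j):
--             if t[i] > t[j]:
--                 total += 1
--     return total
-- ===== Notes on version B (the rewrite author's own statement) =====
-- stated objective: simpler
-- what changed: Target positions are read through a cursor dict instead of destructively popping list heads, and inversions are counted by a direct pairwise double loop instead of a Fenwick (BIT) tree; B also returns 0 on the empty input where A raises ValueError via max([]).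
import Mathlib
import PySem

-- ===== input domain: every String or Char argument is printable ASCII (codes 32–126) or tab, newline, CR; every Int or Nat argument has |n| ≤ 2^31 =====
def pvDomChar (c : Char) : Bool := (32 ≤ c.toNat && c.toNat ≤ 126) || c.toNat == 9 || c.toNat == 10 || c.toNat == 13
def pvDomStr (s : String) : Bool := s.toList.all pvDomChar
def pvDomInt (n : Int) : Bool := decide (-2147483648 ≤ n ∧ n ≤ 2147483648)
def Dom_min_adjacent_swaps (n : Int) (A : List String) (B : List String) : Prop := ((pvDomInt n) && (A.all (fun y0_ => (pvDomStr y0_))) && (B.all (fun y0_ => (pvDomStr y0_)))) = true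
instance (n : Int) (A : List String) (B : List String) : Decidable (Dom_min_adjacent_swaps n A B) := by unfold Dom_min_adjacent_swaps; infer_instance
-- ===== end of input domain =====

-- B replaces A's Fenwick-tree inversion count by a plain pairwise double loop and the
-- destructive pop(0) dict by a cursor dict (objective: simpler); on A = B = [] the Python A
-- raises ValueError (max([])) while B returns 0 — that input is excluded by Pre_.

-- ===== PORT A =====

-- Python's `x & -x` on a positive int is its lowest set bit; for x ≥ 1 this equals
-- Nat.ldiff x (x-1) (exact there; `update`/`query` only ever reach x ≥ 1).
def lb (x : Nat) : Nat := Nat.ldiff x (x - 1)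

theorem lb_odd (m : Nat) : lb (2 * m + 1) = 1 := by
  apply Nat.eq_of_testBit_eq
  intro i
  rw [lb, Nat.testBit_ldiff]
  cases i with
  | zero =>
      simp only [Nat.testBit_zero]
      simp [Nat.mul_mod_right]
  | succ i =>
      rw [Nat.testBit_add_one, Nat.testBit_add_one]
      have h1 : (2 * m + 1) / 2 = m := by omega
      have h2 : (2 * m + 1 - 1) / 2 = m := by omega
      rw [h1, h2]
      simp [Nat.testBit_succ]

theorem lb_even (m : Nat) (h : 0 < m) : lb (2 * m) = 2 * lb m := by
  apply Nat.eq_of_testBit_eq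
  intro i
  rw [lb, Nat.testBit_ldiff]
  cases i with
  | zero =>
      simp only [Nat.testBit_zero]
      simp [Nat.mul_mod_right]
  | succ i =>
      rw [Nat.testBit_add_one, Nat.testBit_add_one, Nat.testBit_add_one]
      have h1 : (2 * m - 1) / 2 = m - 1 := by omega
      have h2 : 2 * m / 2 = m := by omega
      have h3 : 2 * lb m / 2 = lb m := by omega
      rw [h1, h2, h3, lb, Nat.testBit_ldiff]

theorem lb_pos (x : Nat) (h : 0 < x) : 0 < lb x := by
  induction x using Nat.strong_induction_on with
  | _ x ih =>
    rcases Nat.even_or_odd x with ⟨m, hm⟩ | ⟨m, hm⟩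
    · subst hm
      have hm0 : 0 < m := by omega
      have := ih m (by omega) hm0
      rw [show m + m = 2 * m by ring, lb_even m hm0]
      omega
    · subst hm
      rw [lb_odd]; omega

-- query(x): while x > 0: sum += BIT[x]; x -= x & -x
def query (BIT : Nat → Int) (x : Nat) : Int :=
  if h : x = 0 then 0
  else BIT x + query BIT (x - lb x)
termination_by x
decreasing_by have := lb_pos x (Nat.pos_of_ne_zero h); omega

-- update(x, delta): while x <= max_val: BIT[x] += delta; x += x & -x
-- (fuel strictly exceeds the remaining iterations: x ≥ 1 grows by ≥ 1 each step)
def updateLoop (maxv : Nat) (delta : Int) : Nat → (Nat → Int) → Nat → (Nat → Int)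
  | 0, BIT, _ => BIT
  | fuel + 1, BIT, x =>
      if x ≤ maxv then
        updateLoop maxv delta fuel (fun w => if w = x then BIT w + delta else BIT w) (x + lb x)
      else BIT

-- for i in reversed(arr): inv_count += query(i); update(i + 1, 1)
def bitLoop (maxv : Nat) : List Nat → Int → (Nat → Int) → Int
  | [], inv, _ => inv
  | i :: rest, inv, BIT =>
      bitLoop maxv rest (inv + query BIT i) (updateLoop maxv 1 (maxv + 1) BIT (i + 1))

-- count_inversions: max_val = max(arr) + 1 (max([]) raises ValueError — excluded by Pre_);
-- BIT = [0] * (max_val + 1) is modelled as the zero function (all indices used are ≤ max_val)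
def fenwickCount (arr : List Nat) : Int :=
  let maxv := arr.foldl max 0 + 1
  bitLoop maxv arr.reverse 0 (fun _ => 0)

-- Counter(A) != Counter(B): Python dict equality ignores insertion order
def counterEqPy (c d : PySem.Dict String Int) : Bool :=
  (c.items.all fun p => d.getD p.1 0 == p.2) && (d.items.all fun p => c.getD p.1 0 == p.2)

-- index_map = {char: [] for char in B}; for i, char in enumerate(B): index_map[char].append(i)
-- (positions are list indices i ≥ 0, encoded as Nat via zipIdx)
def buildIndexMap (B : List String) : PySem.Dict String (List Nat) :=
  B.zipIdx.foldl (fun d p => d.modify p.1 [] (fun l => l ++ [p.2]))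
    (B.foldl (fun d c => d.insert c ([] : List Nat)) PySem.Dict.empty)

-- for char in A: target_positions.append(index_map[char].pop(0))
-- ([] case: Python raises IndexError there; unreachable when the counters are equal)
def popTargets (A : List String) (im : PySem.Dict String (List Nat)) : List Nat :=
  (A.foldl (fun st c =>
      match st.2.getD c [] with
      | [] => (st.1 ++ [0], st.2)
      | x :: xs => (st.1 ++ [x], st.2.insert c xs))
    (([] : List Nat), im)).1

def min_adjacent_swaps (n : Int) (A : List String) (B : List String) : Int :=
  if !(counterEqPy (PySem.Dict.counter A) (PySem.Dict.counter B)) then -1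
  else fenwickCount (popTargets A (buildIndexMap B))

-- ===== PORT B =====

-- for char in A: k = taken.get(char, 0); t.append(index_map[char][k]); taken[char] = k + 1
def cursorTargets (A : List String) (im : PySem.Dict String (List Nat)) : List Nat :=
  (A.foldl (fun st c =>
      let k := st.2.getD c 0
      (st.1 ++ [(im.getD c []).getD k 0], st.2.insert c (k + 1)))
    (([] : List Nat), (PySem.Dict.empty : PySem.Dict String Nat))).1

-- total = 0; for j in range(len(t)): for i in range(j): if t[i] > t[j]: total += 1
def bruteCount (t : List Nat) : Int :=
  (List.range t.length).foldl (fun total j =>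
    (List.range j).foldl (fun total i =>
      if t.getD j 0 < t.getD i 0 then total + 1 else total) total) 0

def min_adjacent_swaps_alt (n : Int) (A : List String) (B : List String) : Int :=
  if !(counterEqPy (PySem.Dict.counter A) (PySem.Dict.counter B)) then -1
  else bruteCount (cursorTargets A (buildIndexMap B))

-- ===== PRECONDITION & SPEC =====

-- Pre_ excludes only A = [] ∧ B = [], the single input shape on which the Python A raises
-- (ValueError from max([]) inside count_inversions); A returns normally everywhere else.
def Pre_min_adjacent_swaps (n : Int) (A : List String) (B : List String) : Prop :=
  ¬ (A = [] ∧ B = [])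
instance (n : Int) (A : List String) (B : List String) : Decidable (Pre_min_adjacent_swaps n A B) := by
  unfold Pre_min_adjacent_swaps; infer_instance

def pvWitness_min_adjacent_swaps : Int × List String × List String := (0, ["a", "b"], ["b", "a"])

def Spec_min_adjacent_swaps (n : Int) (A : List String) (B : List String) (out : Int) : Prop :=
  out = min_adjacent_swaps_alt n A B
instance (n : Int) (A : List String) (B : List String) (out : Int) : Decidable (Spec_min_adjacent_swaps n A B out) := by
  unfold Spec_min_adjacent_swaps; infer_instance

-- ===== CLAIM (what is proved, stated in full; the proofs are below) =====
def Claim_equal_min_adjacent_swaps : Prop := ∀ (n : Int) (A : List String) (B : List String), Dom_min_adjacent_swaps n A B → Pre_min_adjacent_swaps n A B → Spec_min_adjacent_swaps n A B (min_adjacent_swaps n A B)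

-- ===== LEMMAS AND PROOFS =====

theorem lb_le (x : Nat) : lb x ≤ x := by
  induction x using Nat.strong_induction_on with
  | _ x ih =>
    rcases Nat.even_or_odd x with ⟨m, hm⟩ | ⟨m, hm⟩
    · subst hm
      rcases Nat.eq_zero_or_pos m with h0 | h0
      · subst h0; simp [lb, Nat.ldiff]
      · have := ih m (by omega) 
        rw [show m + m = 2 * m by ring, lb_even m h0]; omega
    · subst hm; rw [lb_odd]; omega

-- the Fenwick chain identity: z is on the update chain of y (i.e. z - lb z < y ≤ z)
-- iff z = y or z is on the update chain of y's successor y + lb y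
theorem chainIff (z : Nat) : ∀ y : Nat, 0 < y →
    ((z - lb z < y ∧ y ≤ z) ↔ (z = y ∨ (z - lb z < y + lb y ∧ y + lb y ≤ z))) := by
  induction z using Nat.strong_induction_on with
  | _ z ih =>
    intro y hy
    rcases Nat.eq_zero_or_pos z with hz | hz
    · subst hz
      constructor
      · rintro ⟨_, h⟩; omega
      · rintro (h | ⟨_, h2⟩) <;> omega
    rcases Nat.even_or_odd z with ⟨b, hb⟩ | ⟨b, hb⟩
    · have hbz : z = 2 * b := by omega
      have hb0 : 0 < b := by omega
      have hlbz : lb z = 2 * lb b := by rw [hbz, lb_even b hb0]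
      have hlbb : lb b ≤ b := lb_le b
      rcases Nat.even_or_odd y with ⟨c, hc⟩ | ⟨c, hc⟩
      · have hcy : y = 2 * c := by omega
        have hc0 : 0 < c := by omega
        have hlby : lb y = 2 * lb c := by rw [hcy, lb_even c hc0]
        have hlbc : lb c ≤ c := lb_le c
        have hIH := ih b (by omega) c hc0
        omega
      · have hcy : y = 2 * c + 1 := by omega
        have hlby : lb y = 1 := by rw [hcy, lb_odd]
        omega
    · have hbz : z = 2 * b + 1 := by omega
      have hlbz : lb z = 1 := by rw [hbz, lb_odd]
      obtain ⟨k, hk⟩ : ∃ k, y + lb y = 2 * k := by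
        rcases Nat.even_or_odd y with ⟨c, hc⟩ | ⟨c, hc⟩
        · have hcy : y = 2 * c := by omega
          have hc0 : 0 < c := by omega
          exact ⟨c + lb c, by rw [hcy, lb_even c hc0]; ring⟩
        · have hcy : y = 2 * c + 1 := by omega
          exact ⟨c + 1, by rw [hcy, lb_odd]; ring⟩
      omega

def cntT (S : List Nat) (z : Nat) : Int :=
  ((S.countP fun v => decide (z - lb z < v + 1) && decide (v + 1 ≤ z)) : Int)

theorem upd_spec (maxv : Nat) (delta : Int) : ∀ (fuel : Nat) (BIT : Nat → Int) (y : Nat),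
    0 < y → maxv + 1 ≤ y + fuel → ∀ z,
    updateLoop maxv delta fuel BIT y z
      = BIT z + (if z - lb z < y ∧ y ≤ z ∧ z ≤ maxv then delta else 0) := by
  intro fuel
  induction fuel with
  | zero =>
      intro BIT y hy hb z
      simp only [updateLoop]
      rw [if_neg (by omega)]
      ring
  | succ fuel IH =>
      intro BIT y hy hb z
      simp only [updateLoop]
      by_cases hle : y ≤ maxv
      · rw [if_pos hle]
        have hlby := lb_pos y hy
        rw [IH _ (y + lb y) (by omega) (by omega) z]
        have hchain := chainIff z y hy
        by_cases hzy : z = y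
        · subst hzy
          have hlbz := lb_pos z hy
          rw [if_pos rfl, if_neg (by omega), if_pos (by omega)]
          ring
        · rw [if_neg hzy]
          have hiff : (z - lb z < y + lb y ∧ y + lb y ≤ z ∧ z ≤ maxv)
              ↔ (z - lb z < y ∧ y ≤ z ∧ z ≤ maxv) := by omega
          rw [if_congr hiff rfl rfl]
      · rw [if_neg hle, if_neg (by omega)]
        ring

theorem countP_split (S : List Nat) (a b : Nat) (hab : a ≤ b) :
    S.countP (fun v => decide (v + 1 ≤ b))
      = (S.countP fun v => decide (a < v + 1) && decide (v + 1 ≤ b))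
        + S.countP (fun v => decide (v + 1 ≤ a)) := by
  induction S with
  | nil => simp
  | cons v S IH =>
      simp only [List.countP_cons, IH, Bool.and_eq_true, decide_eq_true_eq]
      split_ifs <;> omega

theorem query_spec (S : List Nat) : ∀ (x : Nat) (BIT : Nat → Int),
    (∀ z, z ≤ x → BIT z = cntT S z) →
    query BIT x = ((S.countP fun v => decide (v + 1 ≤ x)) : Int) := by
  intro x
  induction x using Nat.strong_induction_on with
  | _ x IHx =>
    intro BIT hBIT
    by_cases hx : x = 0
    · subst hx
      rw [query]
      simp
    · rw [query, dif_neg hx]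
      have hlb := lb_pos x (Nat.pos_of_ne_zero hx)
      have hlble := lb_le x
      rw [hBIT x le_rfl,
          IHx (x - lb x) (by omega) BIT (fun z hz => hBIT z (by omega))]
      have hsplit := countP_split S (x - lb x) x (by omega)
      simp only [cntT]
      omega

def crossAcc (S : List Nat) : List Nat → Int
  | [] => 0
  | i :: rest => ((S.countP fun v => decide (v + 1 ≤ i)) : Int) + crossAcc (i :: S) rest

theorem bitLoop_spec (maxv : Nat) : ∀ (l S : List Nat) (inv : Int) (BIT : Nat → Int),
    (∀ v ∈ l, v < maxv) → (∀ z, z ≤ maxv → BIT z = cntT S z) →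
    bitLoop maxv l inv BIT = inv + crossAcc S l := by
  intro l
  induction l with
  | nil => intro S inv BIT _ _; simp [bitLoop, crossAcc]
  | cons i rest IH =>
      intro S inv BIT hlt hBIT
      have hi : i < maxv := hlt i (by simp)
      simp only [bitLoop]
      rw [query_spec S i BIT (fun z hz => hBIT z (by omega))]
      rw [IH (i :: S) _ _ (fun v hv => hlt v (List.mem_cons_of_mem _ hv)) ?_]
      · simp only [crossAcc]; ring
      · intro z hz
        rw [upd_spec maxv 1 (maxv + 1) BIT (i + 1) (by omega) (by omega) z,
            hBIT z hz]
        simp only [cntT, List.countP_cons, Bool.and_eq_true, decide_eq_true_eq]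
        push_cast
        split_ifs <;> omega

theorem crossAcc_append (a : Nat) : ∀ (l S : List Nat),
    crossAcc S (l ++ [a]) = crossAcc S l + ((l.reverse ++ S).countP fun v => decide (v + 1 ≤ a)) := by
  intro l
  induction l with
  | nil => intro S; simp [crossAcc]
  | cons i l IH =>
      intro S
      simp only [List.cons_append, crossAcc, IH (i :: S), List.reverse_cons,
        List.countP_append, List.countP_cons, List.append_assoc, List.cons_append,
        List.nil_append]
      push_cast
      ring

def invCount : List Nat → Int
  | [] => 0
  | a :: l => ((l.countP fun v => decide (v + 1 ≤ a)) : Int) + invCount l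

theorem crossAcc_reverse (t : List Nat) : crossAcc [] t.reverse = invCount t := by
  induction t with
  | nil => simp [crossAcc, invCount]
  | cons a t IH =>
      rw [List.reverse_cons, crossAcc_append, IH]
      simp only [invCount, List.reverse_reverse, List.append_nil]
      ring

theorem invCount_append (l : List Nat) (a : Nat) :
    invCount (l ++ [a]) = invCount l + ((l.countP fun v => decide (a + 1 ≤ v)) : Int) := by
  induction l with
  | nil => simp [invCount]
  | cons b l IH =>
      simp only [List.cons_append, invCount, IH, List.countP_append,
        List.countP_cons, List.countP_nil, decide_eq_true_eq]
      split_ifs <;> push_cast <;> ring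

theorem rangeCount (l : List Nat) (p : Nat → Bool) :
    (List.range l.length).countP (fun i => p (l.getD i 0)) = l.countP p := by
  induction l generalizing p with
  | nil => simp
  | cons a l IH =>
      simp only [List.length_cons, List.range_succ_eq_map, List.countP_cons,
        List.countP_map, List.getD_cons_zero]
      have : (fun i => p ((a :: l).getD i 0)) ∘ Nat.succ = fun i => p (l.getD i 0) := by
        funext i; simp
      rw [this, IH]

theorem bruteCount_append (l : List Nat) (a : Nat) :
    bruteCount (l ++ [a]) = bruteCount l + ((l.countP fun v => decide (a + 1 ≤ v)) : Int) := by
  have hin : ∀ (t : List Nat) (j : Nat) (tot : Int),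
      (List.range j).foldl (fun total i => if t.getD j 0 < t.getD i 0 then total + 1 else total) tot
        = tot + ((List.range j).countP fun i => decide (t.getD j 0 < t.getD i 0)) := by
    intro t j tot
    simpa using PySem.List.foldl_count_if (fun i => decide (t.getD j 0 < t.getD i 0)) (List.range j) tot
  have hpre : (List.range l.length).foldl (fun total j =>
        (List.range j).foldl (fun total i =>
          if (l ++ [a]).getD j 0 < (l ++ [a]).getD i 0 then total + 1 else total) total) (0 : Int)
      = (List.range l.length).foldl (fun total j =>
        (List.range j).foldl (fun total i =>
          if l.getD j 0 < l.getD i 0 then total + 1 else total) total) (0 : Int) := by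
    apply PySem.List.foldl_congr_mem
    intro acc j hj
    apply PySem.List.foldl_congr_mem
    intro acc2 i hi
    rw [List.getD_append _ _ 0 j (List.mem_range.mp hj),
        List.getD_append _ _ 0 i (by have h1 := List.mem_range.mp hi; have h2 := List.mem_range.mp hj; omega)]
  unfold bruteCount
  simp only [List.length_append, List.length_cons, List.length_nil, Nat.zero_add]
  rw [List.range_succ, List.foldl_append, hpre]
  simp only [List.foldl_cons, List.foldl_nil]
  rw [hin]
  congr 1
  have hgeta : (l ++ [a]).getD l.length 0 = a := by simp
  simp only [hgeta]
  have hcong : ∀ i ∈ List.range l.length,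
      (decide (a < (l ++ [a]).getD i 0) = true) ↔ (decide (a + 1 ≤ l.getD i 0) = true) := by
    intro i hi
    rw [List.getD_append _ _ 0 i (List.mem_range.mp hi)]
    simp only [decide_eq_true_eq]
    omega
  rw [List.countP_congr hcong, rangeCount l (fun v => decide (a + 1 ≤ v))]

theorem brute_eq_inv (t : List Nat) : bruteCount t = invCount t := by
  induction t using List.reverseRecOn with
  | nil => rfl
  | append_singleton l a IH => rw [bruteCount_append, invCount_append, IH]

theorem fenwick_eq_brute (t : List Nat) : fenwickCount t = bruteCount t := by
  unfold fenwickCount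
  rw [bitLoop_spec (t.foldl max 0 + 1) t.reverse [] 0 (fun _ => 0)
        (fun v hv => by
          have := (PySem.List.le_foldl_max t 0).2 v (List.mem_reverse.mp hv)
          omega)
        (fun z _ => by simp [cntT])]
  rw [crossAcc_reverse, brute_eq_inv]
  ring

theorem targets_loop (im : PySem.Dict String (List Nat)) :
    ∀ (chars : List String) (acc : List Nat) (d : PySem.Dict String (List Nat))
      (tk : PySem.Dict String Nat),
    (∀ c : String, d.getD c [] = (im.getD c []).drop (tk.getD c 0)) →
    (chars.foldl (fun st c =>
        match st.2.getD c [] with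
        | [] => (st.1 ++ [0], st.2)
        | x :: xs => (st.1 ++ [x], st.2.insert c xs)) (acc, d)).1
      = (chars.foldl (fun st c =>
          let k := st.2.getD c 0
          (st.1 ++ [(im.getD c []).getD k 0], st.2.insert c (k + 1))) (acc, tk)).1 := by
  intro chars
  induction chars with
  | nil => intro acc d tk _; rfl
  | cons c chars IH =>
      intro acc d tk h
      have hc := h c
      simp only [List.foldl_cons]
      cases hd : d.getD c [] with
      | nil =>
          rw [hd] at hc
          have hk : (im.getD c []).length ≤ tk.getD c 0 := List.drop_eq_nil_iff.mp hc.symm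
          rw [List.getD_eq_default _ _ hk]
          apply IH
          intro c'
          by_cases hcc : c' = c
          · subst hcc
            rw [PySem.Dict.getD_insert, if_pos rfl, hd]
            exact (List.drop_eq_nil_iff.mpr (by omega)).symm
          · rw [PySem.Dict.getD_insert, if_neg hcc]
            exact h c'
      | cons x xs =>
          rw [hd] at hc
          have hlen : tk.getD c 0 < (im.getD c []).length := by
            have := congrArg List.length hc
            simp only [List.length_cons, List.length_drop] at this
            omega
          have hx : (im.getD c []).getD (tk.getD c 0) 0 = x := by
            have hq : (im.getD c [])[tk.getD c 0]? = some x := by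
              have h1 : ((im.getD c []).drop (tk.getD c 0))[0]? = (im.getD c [])[tk.getD c 0 + 0]? :=
                List.getElem?_drop
              rw [← hc] at h1
              simpa using h1.symm
            simp [List.getD_eq_getElem?_getD, hq]
          have hxs : xs = (im.getD c []).drop (tk.getD c 0 + 1) := by
            have ht := congrArg List.tail hc
            simpa [List.tail_drop] using ht
          rw [hx]
          apply IH
          intro c'
          by_cases hcc : c' = c
          · subst hcc
            rw [PySem.Dict.getD_insert, if_pos rfl, PySem.Dict.getD_insert, if_pos rfl]
            exact hxs
          · rw [PySem.Dict.getD_insert, if_neg hcc, PySem.Dict.getD_insert, if_neg hcc]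
            exact h c'

theorem targets_eq (A : List String) (im : PySem.Dict String (List Nat)) :
    popTargets A im = cursorTargets A im := by
  unfold popTargets cursorTargets
  exact targets_loop im A [] im PySem.Dict.empty (by simp)

-- ===== VERDICT (by name: the statement is the Claim_ definition above) =====
theorem min_adjacent_swaps_spec : Claim_equal_min_adjacent_swaps := by
  intro n A B _ _
  unfold Spec_min_adjacent_swaps min_adjacent_swaps min_adjacent_swaps_alt
  split
  · rfl
  · rw [targets_eq, fenwick_eq_brute]
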